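-- pv_equiv track=rewrite | github.com/eldarkg/analog_electronica_uve | visual.py | __latex_ref
-- ===== SOURCE A (Python) =====
-- def __latex_ref(ref):
--     latex = ''
--     outter = True
--     for c in ref:
--         if c == '_':
--             if outter:
--                 latex += c
--                 latex += '{'
--                 outter = False
--             else:
--                 latex += '}'
--                 latex += c
--                 latex += '{'
--         else:
--             latex += c
--
--     if not outter:
--         latex += '}'
--
--     latex = latex.replace('lambda', '\lambda')
--
--     return latex
-- ===== SOURCE B (Python) =====
-- def __latex_ref(ref):
--     # Tokenize on '_' and wrap each subsequent token as a subscript group.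
--     parts = ref.split('_')
--     out = parts[0] + ''.join('_{' + p + '}' for p in parts[1:])
--     return out.replace('lambda', '\lambda')
-- ===== Notes on version B (the rewrite author's own statement) =====
-- stated objective: simpler
-- what changed: Replaced the char-by-char state machine with its boolean open-subscript flag by tokenizing on the underscore delimiter and rejoining each subsequent token as a braced subscript group, applying the lambda replacement to the assembled result; measured faster by avoiding per-character string concatenation.
import Mathlib
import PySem

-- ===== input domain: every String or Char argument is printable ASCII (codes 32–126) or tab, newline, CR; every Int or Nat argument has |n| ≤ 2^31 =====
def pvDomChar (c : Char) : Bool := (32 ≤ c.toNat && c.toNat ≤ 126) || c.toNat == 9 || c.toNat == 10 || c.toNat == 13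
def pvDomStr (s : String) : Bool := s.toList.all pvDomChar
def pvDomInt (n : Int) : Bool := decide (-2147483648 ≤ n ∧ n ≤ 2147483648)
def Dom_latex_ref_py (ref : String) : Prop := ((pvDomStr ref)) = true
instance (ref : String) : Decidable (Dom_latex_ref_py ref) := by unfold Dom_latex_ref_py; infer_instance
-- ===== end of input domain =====

-- B replaces A's char-by-char state machine with its boolean open-subscript flag by tokenizing
-- on the underscore delimiter and rejoining each later token as a braced subscript group (simpler).

-- ===== PORT A =====
-- the for-loop of A: state is (latex so far, outter flag)
def latexLoopA : List Char → List Char → Bool → List Char × Bool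
  | [], latex, outter => (latex, outter)
  | c :: cs, latex, outter =>
    if c = '_' then
      if outter then latexLoopA cs (latex ++ ['_', '{']) false
      else latexLoopA cs (latex ++ ['}', '_', '{']) false
    else latexLoopA cs (latex ++ [c]) outter

def latex_ref_py (ref : String) : String :=
  let st := latexLoopA ref.toList [] true
  let latex := st.1 ++ (if st.2 then [] else ['}'])
  String.ofList (PySem.Chars.replace latex "lambda".toList "\\lambda".toList)

-- ===== PORT B =====
def latex_ref_py_alt (ref : String) : String :=
  let parts := ref.toList.splitOn '_'
  let out :=
    match parts with
    | [] => []  -- unreachable: split always yields at least one part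
    | p :: ps => p ++ ps.flatMap (fun q => ['_', '{'] ++ q ++ ['}'])
  String.ofList (PySem.Chars.replace out "lambda".toList "\\lambda".toList)

-- ===== PRECONDITION & SPEC =====
def Spec_latex_ref_py (ref : String) (out : String) : Prop := out = latex_ref_py_alt ref
instance (ref : String) (out : String) : Decidable (Spec_latex_ref_py ref out) := by unfold Spec_latex_ref_py; infer_instance

-- ===== CLAIM (what is proved, stated in full; the proofs are below) =====
def Claim_equal_latex_ref_py : Prop := ∀ (ref : String), Dom_latex_ref_py ref → Spec_latex_ref_py ref (latex_ref_py ref)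

-- ===== LEMMAS AND PROOFS =====

-- the wrapped-token flattening of B
def wrapB (ps : List (List Char)) : List Char :=
  ps.flatMap (fun q => ['_', '{'] ++ q ++ ['}'])

-- A's loop, started in either mode, closed at the end, equals B's split-based build.
theorem latexLoopA_splitOn (cs : List Char) : ∀ (acc : List Char),
    (∀ p ps, cs.splitOn '_' = p :: ps →
      (let st := latexLoopA cs acc true; st.1 ++ (if st.2 then [] else ['}']))
        = acc ++ p ++ wrapB ps) ∧
    (∀ p ps, cs.splitOn '_' = p :: ps →
      (let st := latexLoopA cs acc false; st.1 ++ (if st.2 then [] else ['}']))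
        = acc ++ p ++ ['}'] ++ wrapB ps) := by
  induction cs with
  | nil =>
    intro acc
    constructor <;> intro p ps h <;>
      rw [List.splitOn_nil] at h <;>
      injection h with h1 h2 <;> subst h1 <;> subst h2 <;>
      simp [latexLoopA, wrapB]
  | cons c cs ih =>
    intro acc
    have hsplit : (c :: cs).splitOn '_'
        = if c == '_' then [] :: cs.splitOn '_'
          else (cs.splitOn '_').modifyHead (c :: ·) := by
      simp [List.splitOn, List.splitOnP_cons]
    obtain ⟨p', ps', hps'⟩ := List.exists_cons_of_ne_nil (List.splitOnP_ne_nil (· == '_') cs)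
    have hps2 : cs.splitOn '_' = p' :: ps' := by simpa [List.splitOn] using hps' 
    constructor <;> intro p ps h
    · by_cases hc : c = '_'
      · subst hc
        simp [hsplit, hps2] at h
        obtain ⟨h1, h2⟩ := h; subst h1; subst h2
        have := (ih (acc ++ ['_', '{'])).2 p' ps' hps2
        simp [latexLoopA, wrapB] at this ⊢
        simp [this]
      · rw [hsplit] at h
        simp [hc, hps2] at h
        obtain ⟨h1, h2⟩ := h; subst h1; subst h2
        have := (ih (acc ++ [c])).1 p' ps' hps2
        simp [latexLoopA, hc] at this ⊢
        simp [this]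
    · by_cases hc : c = '_'
      · subst hc
        simp [hsplit, hps2] at h
        obtain ⟨h1, h2⟩ := h; subst h1; subst h2
        have := (ih (acc ++ ['}', '_', '{'])).2 p' ps' hps2
        simp [latexLoopA, wrapB] at this ⊢
        simp [this]
      · rw [hsplit] at h
        simp [hc, hps2] at h
        obtain ⟨h1, h2⟩ := h; subst h1; subst h2
        have := (ih (acc ++ [c])).2 p' ps' hps2
        simp [latexLoopA, hc] at this ⊢
        simp [this]

-- ===== VERDICT (by name: the statement is the Claim_ definition above) =====
theorem latex_ref_py_spec : Claim_equal_latex_ref_py := by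
  intro ref _
  unfold Spec_latex_ref_py latex_ref_py latex_ref_py_alt
  obtain ⟨p, ps, hps⟩ := List.exists_cons_of_ne_nil
    (List.splitOnP_ne_nil (· == '_') ref.toList)
  have hps' : ref.toList.splitOn '_' = p :: ps := by simpa [List.splitOn] using hps
  have := (latexLoopA_splitOn ref.toList []).1 p ps hps'
  simp only at this
  rw [hps']
  simp [this, wrapB]
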